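-- pv_equiv track=rewrite | github.com/sid25489/quizapp | quizproject/quizapp/validators.py | find_duplicate_questions
-- ===== SOURCE A (Python) =====
-- from typing import List, Dict, Tuple, Any
--
-- def find_duplicate_questions(questions: List[Dict], existing_text: List[str]) -> List[int]:
--     """
--     Find rows that duplicate existing questions by text.
--     Returns list of row numbers (0-indexed) that are duplicates.
--     """
--     duplicates = []
--     seen_text = set(existing_text)
--
--     for idx, question in enumerate(questions):
--         question_text = str(question.get('question', '')).strip().lower()
--         if question_text in seen_text:
--             duplicates.append(idx)
--         else:
--             seen_text.add(question_text)
--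
--     return duplicates
-- ===== SOURCE B (Python) =====
-- def find_duplicate_questions(questions, existing_text):
--     """
--     Find rows that duplicate existing questions by text.
--     Returns list of row numbers (0-indexed) that are duplicates.
--     """
--     existing = set(existing_text)
--     groups = {}
--     for i, q in enumerate(questions):
--         t = str(q.get('question', '')).strip().lower()
--         groups[t] = groups.get(t, []) + [i]
--     result = []
--     for t, idxs in groups.items():
--         if t in existing:
--             result += idxs
--         else:
--             result += idxs[1:]
--     return sorted(result)
-- ===== Notes on version B (the rewrite author's own statement) =====
-- stated objective: alternative
-- what changed: B replaces A's single streaming pass with a growing seen-set by a group-then-classify scheme: it first builds a dict grouping row indices by normalized text, then emits per group either all indices (text already in the bank) or all but the first occurrence, and finally sorts the collected indices.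
import Mathlib
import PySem

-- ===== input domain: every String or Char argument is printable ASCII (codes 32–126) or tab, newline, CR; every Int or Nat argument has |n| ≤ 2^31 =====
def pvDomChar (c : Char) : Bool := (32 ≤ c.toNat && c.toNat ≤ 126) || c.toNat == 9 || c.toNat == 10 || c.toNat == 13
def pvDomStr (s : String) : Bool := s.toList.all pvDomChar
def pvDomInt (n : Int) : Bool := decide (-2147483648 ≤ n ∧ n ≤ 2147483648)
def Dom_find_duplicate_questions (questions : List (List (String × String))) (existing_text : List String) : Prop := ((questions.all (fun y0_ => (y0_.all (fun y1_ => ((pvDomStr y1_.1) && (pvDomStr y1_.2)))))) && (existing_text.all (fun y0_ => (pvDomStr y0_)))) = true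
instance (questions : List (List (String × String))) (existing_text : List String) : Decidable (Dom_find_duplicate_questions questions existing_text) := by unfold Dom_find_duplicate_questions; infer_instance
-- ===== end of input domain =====

-- B replaces A's streaming seen-set pass by a group-then-classify scheme (dict of indices per
-- normalized text, per-group emission, final sort); objective: alternative decomposition, not faster.


-- shared helper: str(q.get('question', '')).strip().lower()
def pvNorm (q : List (String × String)) : String :=
  PySem.Str.lower (PySem.Str.strip (PySem.Dict.getD (PySem.Dict.mk q) "question" ""))

-- ===== PORT A =====
-- literal port of A: for idx, question in enumerate(questions): normalize; if in seen append idx else add to seen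
def find_duplicate_questions (questions : List (List (String × String))) (existing_text : List String) : List Int :=
  ((PySem.List.enumerate questions 0).foldl
    (fun (st : List Int × PySem.Set String) p =>
      let question_text := pvNorm p.2
      if (st.2.contains question_text) then (st.1 ++ [p.1], st.2)
      else (st.1, st.2.add question_text))
    ([], PySem.Set.ofList existing_text)).1

-- ===== PORT B =====
-- port of B: build groups dict (normalized text → row indices), emit per group (all indices if the
-- text is in the existing set, else all but the first), then sort the collected indices
def find_duplicate_questions_alt (questions : List (List (String × String))) (existing_text : List String) : List Int :=
  let existing := PySem.Set.ofList existing_text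
  let groups := (PySem.List.enumerate questions 0).foldl
      (fun (g : PySem.Dict String (List Int)) p =>
        PySem.Dict.modify g (pvNorm p.2) [] (fun l => l ++ [p.1]))
      PySem.Dict.empty
  let result := groups.items.foldl
      (fun (r : List Int) kv =>
        if PySem.Set.contains existing kv.1 then r ++ kv.2
        else r ++ PySem.List.slice kv.2 (some 1) none)
      []
  PySem.List.sorted result (fun x => x) false

-- ===== PRECONDITION & SPEC =====
def Spec_find_duplicate_questions (questions : List (List (String × String))) (existing_text : List String) (out : List Int) : Prop := out = find_duplicate_questions_alt questions existing_text
instance (questions : List (List (String × String))) (existing_text : List String) (out : List Int) : Decidable (Spec_find_duplicate_questions questions existing_text out) := by unfold Spec_find_duplicate_questions; infer_instance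

-- ===== CLAIM (what is proved, stated in full; the proofs are below) =====
def Claim_equal_find_duplicate_questions : Prop := ∀ (questions : List (List (String × String))) (existing_text : List String), Dom_find_duplicate_questions questions existing_text → Spec_find_duplicate_questions questions existing_text (find_duplicate_questions questions existing_text)

-- ===== LEMMAS AND PROOFS =====

-- reference function: indices (= done.length, done.length+1, …) of the rows of `rest`
-- whose normalized text occurs in `ex` or among the earlier normalized texts `done`
def pvSpecAux (ex : List String) : List String → List String → List Int
  | [], _ => []
  | t :: rest, done =>
    if t ∈ ex ∨ t ∈ done
    then (done.length : Int) :: pvSpecAux ex rest (done ++ [t])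
    else pvSpecAux ex rest (done ++ [t])

-- A's loop (on the list of normalized texts) computes pvSpecAux
lemma pvA_loop (ex : List String) (rest done : List String) (acc : List Int) (s : PySem.Set String)
    (hs : ∀ x, x ∈ s ↔ x ∈ ex ∨ x ∈ done) :
    ((PySem.List.enumerate rest (done.length : Int)).foldl
      (fun (st : List Int × PySem.Set String) p =>
        if (st.2.contains p.2) then (st.1 ++ [p.1], st.2)
        else (st.1, st.2.add p.2))
      (acc, s)).1
    = acc ++ pvSpecAux ex rest done := by
  induction rest generalizing done acc s with
  | nil => simp [pvSpecAux, PySem.List.enumerate_nil]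
  | cons t rest ih =>
    rw [PySem.List.enumerate_cons]
    simp only [List.foldl_cons, pvSpecAux]
    by_cases h : t ∈ ex ∨ t ∈ done
    · have hc : s.contains t = true := (PySem.Set.contains_iff ..).mpr ((hs t).mpr h)
      simp only [hc, if_true, h]
      have := ih (done ++ [t]) (acc ++ [(done.length : Int)]) s
        (fun x => by
          simp only [List.mem_append, List.mem_singleton]
          rw [hs x]
          constructor
          · exact fun hx => hx.imp id Or.inl
          · rintro (hx | hx | rfl)
            · exact Or.inl hx
            · exact Or.inr hx
            · exact h)
      simpa [List.append_assoc] using this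
    · have hc : s.contains t = false := by
        rw [Bool.eq_false_iff]
        intro h'
        exact h ((hs t).mp ((PySem.Set.contains_iff ..).mp h'))
      simp only [hc, if_false, h]
      have := ih (done ++ [t]) acc (s.add t)
        (fun x => by
          rw [PySem.Set.mem_add, hs x]
          simp only [List.mem_append, List.mem_singleton]
          tauto)
      simpa using this

-- pvSpecAux as a positional filter over the enumerated texts
lemma pvSpec_filter (ex norms : List String) (rest done : List String) (h : done ++ rest = norms) :
    ((PySem.List.enumerate rest (done.length : Int)).filter
      (fun p => ex.contains p.2 || (PySem.List.slice norms none (some p.1)).contains p.2)).map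
      (fun p => p.1)
    = pvSpecAux ex rest done := by
  induction rest generalizing done with
  | nil => simp [pvSpecAux, PySem.List.enumerate_nil]
  | cons t rest ih =>
    rw [PySem.List.enumerate_cons]
    simp only [List.filter_cons, pvSpecAux]
    have hslice : PySem.List.slice norms none (some (done.length : Int)) = done := by
      rw [PySem.List.slice_to_natCast, ← h, List.take_left]
    have hcond : (ex.contains t || (PySem.List.slice norms none (some (done.length : Int))).contains t)
        = decide (t ∈ ex ∨ t ∈ done) := by
      rw [hslice]; simp [List.contains_eq_mem]
    by_cases hm : t ∈ ex ∨ t ∈ done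
    all_goals {
      rw [hcond]
      have := ih (done ++ [t]) (by simpa using h)
      simp only [List.length_append, List.length_cons, List.length_nil] at this
      push_cast at this
      simp only [hm, decide_true, decide_false, if_true, Bool.false_eq_true, if_false,
        List.map_cons, this]
    }

-- enumerate of a mapped list
lemma pvEnumerate_map {α β : Type} (f : α → β) (xs : List α) (s : Int) :
    PySem.List.enumerate (xs.map f) s = (PySem.List.enumerate xs s).map (fun p => (p.1, f p.2)) := by
  induction xs generalizing s with
  | nil => simp [PySem.List.enumerate_nil]
  | cons x xs ih => rw [List.map_cons, PySem.List.enumerate_cons, PySem.List.enumerate_cons]; simp [ih]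

-- membership in pvSpecAux from the start
lemma pvMem_pvSpec (ex norms : List String) (i : Int) :
    i ∈ pvSpecAux ex norms [] ↔
      ∃ k : Nat, ∃ hk : k < norms.length,
        i = (k : Int) ∧ (norms[k] ∈ ex ∨ norms[k] ∈ norms.take k) := by
  have h := pvSpec_filter ex norms norms [] rfl
  simp only [List.length_nil, Nat.cast_zero] at h
  rw [← h]
  simp only [List.mem_map, List.mem_filter, PySem.List.mem_enumerate_iff]
  constructor
  · rintro ⟨p, ⟨⟨k, hk, rfl⟩, hcond⟩, rfl⟩
    simp only [zero_add] at hcond ⊢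
    rw [PySem.List.slice_to_natCast] at hcond
    refine ⟨k, hk, rfl, ?_⟩
    simpa [List.contains_eq_mem, - List.getElem_mem] using hcond
  · rintro ⟨k, hk, rfl, hcond⟩
    refine ⟨((k : Int), norms[k]), ⟨⟨k, hk, by simp⟩, ?_⟩, rfl⟩
    simp only []
    rw [PySem.List.slice_to_natCast]
    simpa [List.contains_eq_mem, - List.getElem_mem] using hcond

-- pvSpecAux is strictly increasing, all elements ≥ done.length
lemma pvSpec_pairwise (ex : List String) (rest done : List String) :
    (pvSpecAux ex rest done).Pairwise (· < ·) ∧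
      ∀ x ∈ pvSpecAux ex rest done, (done.length : Int) ≤ x := by
  induction rest generalizing done with
  | nil => simp [pvSpecAux]
  | cons t rest ih =>
    have h := ih (done ++ [t])
    simp only [List.length_append, List.length_cons, List.length_nil] at h
    constructor
    · simp only [pvSpecAux]
      split_ifs with hc
      · refine List.pairwise_cons.mpr ⟨fun x hx => ?_, h.1⟩
        have := h.2 x hx
        push_cast at this ⊢
        omega
      · exact h.1
    · intro x hx
      simp only [pvSpecAux] at hx
      split_ifs at hx with hc
      · rcases List.mem_cons.mp hx with rfl | hx
        · exact le_refl _
        · have := h.2 x hx; push_cast at this ⊢; omega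
      · have := h.2 x hx; push_cast at this ⊢; omega

-- indices of the rows whose normalized text equals t (over the swapped enumerate of norms)
def pvIdxs (norms : List String) (t : String) : List Int :=
  (((PySem.List.enumerate norms 0).map (fun p => (p.2, p.1))).filter (fun p => p.1 == t)).map (fun p => p.2)

lemma pvMem_idxs (norms : List String) (t : String) (i : Int) :
    i ∈ pvIdxs norms t ↔ ∃ k : Nat, ∃ hk : k < norms.length, i = (k : Int) ∧ norms[k] = t := by
  simp only [pvIdxs, List.mem_map, List.mem_filter, PySem.List.mem_enumerate_iff]
  constructor
  · rintro ⟨p, ⟨⟨q, ⟨k, hk, rfl⟩, rfl⟩, ht⟩, rfl⟩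
    exact ⟨k, hk, by simp, by simpa using ht⟩
  · rintro ⟨k, hk, rfl, ht⟩
    exact ⟨(norms[k], (k : Int)), ⟨⟨((k : Int), norms[k]), ⟨k, hk, by simp⟩, rfl⟩, by simpa using ht⟩, rfl⟩

lemma pvIdxs_pairwise (norms : List String) (t : String) : (pvIdxs norms t).Pairwise (· < ·) := by
  unfold pvIdxs
  rw [List.pairwise_map]
  apply List.Pairwise.filter
  rw [List.pairwise_map]
  exact PySem.List.pairwise_lt_enumerate norms 0

-- tail membership in a strictly increasing list
lemma pvMem_tail (l : List Int) (hl : l.Pairwise (· < ·)) (x : Int) :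
    x ∈ l.tail ↔ x ∈ l ∧ ∃ y ∈ l, y < x := by
  cases l with
  | nil => simp
  | cons h t =>
    rw [List.pairwise_cons] at hl
    simp only [List.tail_cons, List.mem_cons]
    constructor
    · intro hx
      exact ⟨Or.inr hx, h, Or.inl rfl, hl.1 x hx⟩
    · rintro ⟨hx, y, hy, hyx⟩
      rcases hx with rfl | hx
      · rcases hy with rfl | hy
        · omega
        · have := hl.1 y hy; omega
      · exact hx

-- ===== main proof =====
theorem find_duplicate_questions_spec : Claim_equal_find_duplicate_questions := by
  intro questions existing_text _
  unfold Spec_find_duplicate_questions find_duplicate_questions find_duplicate_questions_alt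
  dsimp only
  set norms := questions.map pvNorm with hn
  set ex := existing_text with hex
  -- A computes pvSpecAux
  have hA : ((PySem.List.enumerate questions 0).foldl
      (fun (st : List Int × PySem.Set String) p =>
        if (st.2.contains (pvNorm p.2)) then (st.1 ++ [p.1], st.2)
        else (st.1, st.2.add (pvNorm p.2)))
      ([], PySem.Set.ofList ex)).1 = pvSpecAux ex norms [] := by
    have h0 := pvA_loop ex norms [] [] (PySem.Set.ofList ex)
      (fun x => by rw [PySem.Set.mem_ofList]; simp)
    simp only [List.length_nil, Nat.cast_zero, List.nil_append] at h0
    rw [← h0, hn, pvEnumerate_map, List.foldl_map]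
  set ps := ((PySem.List.enumerate norms 0).map (fun p => (p.2, p.1))) with hps
  -- B's groups dict is a fold over the swapped pairs
  have hG : ((PySem.List.enumerate questions 0).foldl
      (fun (g : PySem.Dict String (List Int)) p =>
        PySem.Dict.modify g (pvNorm p.2) [] (fun l => l ++ [p.1]))
      PySem.Dict.empty)
    = ps.foldl (fun (g : PySem.Dict String (List Int)) p =>
        PySem.Dict.modify g p.1 [] (fun l => l ++ [p.2])) PySem.Dict.empty := by
    rw [hps, hn, pvEnumerate_map, List.foldl_map, List.foldl_map]
  rw [hA, hG]
  set groups := ps.foldl (fun (g : PySem.Dict String (List Int)) p =>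
      PySem.Dict.modify g p.1 [] (fun l => l ++ [p.2])) PySem.Dict.empty with hgr
  have hfst : ps.map (fun p => p.1) = norms := by
    rw [hps, List.map_map]
    exact PySem.List.map_snd_enumerate norms 0
  have hkeys : groups.keys = PySem.Set.ofList norms := by
    calc groups.keys
        = PySem.Set.update PySem.Dict.empty.keys (ps.map (fun p => p.1)) :=
          PySem.Dict.keys_foldl_modify_key ps (fun p => p.1) ([] : List Int)
            (fun _ p l => l ++ [p.2]) PySem.Dict.empty
      _ = PySem.Set.ofList norms := by
          rw [hfst]
          simp [PySem.Dict.keys_empty, PySem.Set.update, PySem.Set.ofList_eq_foldl]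
  have hnodup : groups.keys.Nodup := by
    rw [hkeys]; exact PySem.Set.nodup_ofList norms
  have hgetD : ∀ t, groups.getD t [] = pvIdxs norms t := by
    intro t
    calc groups.getD t []
        = PySem.Dict.empty.getD t [] ++ ((ps.filter (fun p => p.1 == t)).map (fun p => p.2)) :=
          PySem.Dict.getD_foldl_modify_append ps PySem.Dict.empty t
      _ = pvIdxs norms t := by simp [pvIdxs, hps, PySem.Dict.getD_empty]
  have hitems : groups.items = groups.keys.map (fun k => (k, pvIdxs norms k)) := by
    rw [PySem.Dict.items_eq_map_keys groups hnodup []]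
    exact List.map_congr_left (fun k _ => by rw [hgetD])
  -- the collected result is a flatMap over the distinct texts
  have hfun : (fun (r : List Int) (kv : String × List Int) =>
      if PySem.Set.contains (PySem.Set.ofList ex) kv.1 then r ++ kv.2
      else r ++ PySem.List.slice kv.2 (some 1) none)
    = (fun (r : List Int) kv => r ++
        (if PySem.Set.contains (PySem.Set.ofList ex) kv.1 then kv.2
         else PySem.List.slice kv.2 (some 1) none)) := by
    funext r kv; split_ifs <;> rfl
  have hbr : (fun (t : String) =>
      if PySem.Set.contains (PySem.Set.ofList ex) t then pvIdxs norms t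
      else PySem.List.slice (pvIdxs norms t) (some 1) none)
    = (fun t => if t ∈ ex then pvIdxs norms t else (pvIdxs norms t).tail) := by
    funext t
    rw [PySem.List.slice_from_one]
    by_cases h : t ∈ ex
    · have hc : PySem.Set.contains (PySem.Set.ofList ex) t = true :=
        (PySem.Set.contains_iff ..).mpr ((PySem.Set.mem_ofList ..).mpr h)
      rw [hc]; simp [h]
    · have hc : PySem.Set.contains (PySem.Set.ofList ex) t = false := by
        rw [Bool.eq_false_iff]
        intro h'
        exact h ((PySem.Set.mem_ofList ..).mp ((PySem.Set.contains_iff ..).mp h'))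
      rw [hc]; simp [h]
  have hres : (groups.items.foldl
      (fun (r : List Int) kv =>
        if PySem.Set.contains (PySem.Set.ofList ex) kv.1 then r ++ kv.2
        else r ++ PySem.List.slice kv.2 (some 1) none)
      [])
    = (PySem.Set.ofList norms).flatMap
        (fun t => if t ∈ ex then pvIdxs norms t else (pvIdxs norms t).tail) := by
    rw [hfun, PySem.List.foldl_append_eq_flatMap, hitems, hkeys, List.flatMap_map]
    simp only [List.nil_append]
    rw [← hbr]
  rw [hres]
  -- Perm + sortedness close it
  set F := pvSpecAux ex norms [] with hF
  set R := (PySem.Set.ofList norms).flatMap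
      (fun t => if t ∈ ex then pvIdxs norms t else (pvIdxs norms t).tail) with hR
  have hFpw : F.Pairwise (· < ·) := (pvSpec_pairwise ex norms []).1
  have hFnd : F.Nodup := hFpw.imp (fun h => ne_of_lt h)
  have hsub : ∀ t i, i ∈ (if t ∈ ex then pvIdxs norms t else (pvIdxs norms t).tail) → i ∈ pvIdxs norms t := by
    intro t i hi
    split_ifs at hi with h
    · exact hi
    · exact List.mem_of_mem_tail hi
  have hRnd : R.Nodup := by
    rw [hR, List.nodup_flatMap]
    constructor
    · intro t _
      have hpw := pvIdxs_pairwise norms t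
      split_ifs
      · exact hpw.imp (fun h => ne_of_lt h)
      · exact (hpw.sublist (List.tail_sublist _)).imp (fun h => ne_of_lt h)
    · refine (PySem.Set.nodup_ofList norms).imp ?_
      intro a b hab x hxa hxb
      have ha := (pvMem_idxs norms a x).mp (hsub a x hxa)
      have hb := (pvMem_idxs norms b x).mp (hsub b x hxb)
      obtain ⟨k, hk, rfl, hka⟩ := ha
      obtain ⟨k', hk', hkk, hkb⟩ := hb
      have : k = k' := by exact_mod_cast hkk
      subst this
      exact hab (hka ▸ hkb ▸ rfl)
  have hmem : ∀ i, i ∈ F ↔ i ∈ R := by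
    intro i
    rw [hF, pvMem_pvSpec, hR, List.mem_flatMap]
    constructor
    · rintro ⟨k, hk, rfl, hcond⟩
      refine ⟨norms[k], (PySem.Set.mem_ofList ..).mpr (List.getElem_mem hk), ?_⟩
      have hik : (k : Int) ∈ pvIdxs norms (norms[k]) := (pvMem_idxs ..).mpr ⟨k, hk, rfl, rfl⟩
      by_cases h : norms[k] ∈ ex
      · simp only [h, if_true]; exact hik
      · simp only [h, if_false]
        rcases hcond with h' | h'
        · exact absurd h' h
        · obtain ⟨j, hj, hjt⟩ := List.mem_iff_getElem.mp h'
          rw [List.getElem_take] at hjt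
          have hjlen : j < norms.length := lt_of_lt_of_le hj (by simp [List.length_take])
          have hjk : j < k := lt_of_lt_of_le hj (by simp [List.length_take])
          refine (pvMem_tail _ (pvIdxs_pairwise norms _) _).mpr
            ⟨hik, (j : Int), (pvMem_idxs ..).mpr ⟨j, hjlen, rfl, hjt⟩, by exact_mod_cast hjk⟩
    · rintro ⟨t, htm, hit⟩
      have hik := (pvMem_idxs norms t i).mp (hsub t i hit)
      obtain ⟨k, hk, rfl, hkt⟩ := hik
      refine ⟨k, hk, rfl, ?_⟩
      by_cases h : t ∈ ex
      · exact Or.inl (hkt ▸ h)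
      · simp only [h, if_false] at hit
        have := (pvMem_tail _ (pvIdxs_pairwise norms t) _).mp hit
        obtain ⟨-, y, hy, hyk⟩ := this
        obtain ⟨j, hj, rfl, hjt⟩ := (pvMem_idxs norms t y).mp hy
        have hjk : j < k := by exact_mod_cast hyk
        refine Or.inr ?_
        rw [hkt]
        apply List.mem_iff_getElem.mpr
        refine ⟨j, by simp [List.length_take]; omega, ?_⟩
        rw [List.getElem_take]
        exact hjt
  have hperm : F.Perm R := (List.perm_ext_iff_of_nodup hFnd hRnd).mpr hmem
  exact (PySem.List.sorted_eq_of_perm_of_pairwise_lt R F (fun x => x) hperm hFpw).symm
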